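-- pv_equiv track=rewrite | github.com/moibarzi/commission-calculator | main.py | calculate_commission
-- ===== SOURCE A (Python) =====
-- pricing_structure = {
--     ("inside", 1): 2,
--     ("inside", 2): 5,
--     ("inside", 3): 7,
--     ("outside", 1): 2,
--     ("outside", 2): 5,
--     ("outside", 3): 7,
--     ("balcony", 1): 3,
--     ("balcony", 2): 6,
--     ("balcony", 3): 8,
--     ("suite", 1): 4,
--     ("suite", 2): 7,
--     ("suite", 3): 9,
--     ("yacht", 1): 5,
--     ("yacht", 2): 8,
--     ("yacht", 3): 10
-- }
--
-- tiers = {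
--     1: 585,
--     2: 1025,
--     3: 1000000
-- }
--
-- def calculate_commission(rooms_sold):
--     total_commission = 0
--     total_rooms = 0
--     current_tier = 1
--     tier_commission = {1:0, 2:0, 3:0} # This will store commission per tier
--
--     # Loop through the priority order of rooms
--     for room_type in ["inside", "outside", "balcony", "suite", "yacht"]:
--         if room_type in rooms_sold:
--             for room in range(rooms_sold[room_type]):
--                 total_rooms += 1
--
--                 # check if total_rooms exceeds the current tier's max_rooms
--                 if total_rooms > tiers[current_tier]:
--                     current_tier += 1
--
--                 # add to the total_commission and commission per tier
--                 commission = pricing_structure[(room_type, current_tier)]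
--                 total_commission += commission
--                 tier_commission[current_tier] += commission
--
--     return total_commission, tier_commission
-- ===== SOURCE B (Python) =====
-- def calculate_commission(rooms_sold):
--     # Arithmetic allocation: each room type's count is split across the fixed
--     # cumulative tier boundaries in O(1), instead of looping room by room.
--     boundaries = [585, 1025, 1000000]
--     prices = {"inside": [2, 5, 7], "outside": [2, 5, 7], "balcony": [3, 6, 8],
--               "suite": [4, 7, 9], "yacht": [5, 8, 10]}
--     tier_comm = {1: 0, 2: 0, 3: 0}
--     total = 0
--     pos = 0  # rooms allocated so far
--     for t in ["inside", "outside", "balcony", "suite", "yacht"]: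
--         if t in rooms_sold:
--             c = max(rooms_sold[t], 0)
--             for i in range(3):
--                 lo = pos if i == 0 else max(pos, boundaries[i - 1])
--                 take = min(pos + c, boundaries[i]) - lo
--                 if take > 0:
--                     amt = take * prices[t][i]
--                     tier_comm[i + 1] += amt
--                     total += amt
--             pos += c
--     return total, tier_comm
-- ===== Notes on version B (the rewrite author's own statement) =====
-- stated objective: alternative
-- what changed: B replaces A's room-by-room loop (one iteration per room sold, updating a running tier counter) by an arithmetic split of each room type's count across the fixed cumulative tier boundaries 585/1025/1000000.
-- outside the precondition, e.g. on calculate_commission({'inside': 1000001}): A raises KeyError, B returns (6996195, {1: 1170, 2: 2200, 3: 6992825})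
import Mathlib
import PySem

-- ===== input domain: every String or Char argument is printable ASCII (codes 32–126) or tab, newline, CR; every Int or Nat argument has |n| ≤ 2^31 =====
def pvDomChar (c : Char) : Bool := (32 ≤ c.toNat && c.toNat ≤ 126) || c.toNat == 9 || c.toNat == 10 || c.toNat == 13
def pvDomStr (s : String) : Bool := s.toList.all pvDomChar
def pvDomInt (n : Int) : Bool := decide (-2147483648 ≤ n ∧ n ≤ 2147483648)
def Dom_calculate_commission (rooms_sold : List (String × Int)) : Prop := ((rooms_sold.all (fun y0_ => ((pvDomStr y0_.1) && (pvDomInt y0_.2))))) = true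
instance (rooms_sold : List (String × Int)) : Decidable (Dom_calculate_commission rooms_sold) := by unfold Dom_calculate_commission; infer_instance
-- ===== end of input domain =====

-- B replaces A's room-by-room loop by an arithmetic split of each room-type count across
-- the fixed cumulative tier boundaries (objective: alternative algorithm).

-- ===== PORT A =====
def pricing_structure : PySem.Dict (String × Int) Int := PySem.Dict.mk
  [(("inside", 1), 2), (("inside", 2), 5), (("inside", 3), 7),
   (("outside", 1), 2), (("outside", 2), 5), (("outside", 3), 7),
   (("balcony", 1), 3), (("balcony", 2), 6), (("balcony", 3), 8),
   (("suite", 1), 4), (("suite", 2), 7), (("suite", 3), 9),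
   (("yacht", 1), 5), (("yacht", 2), 8), (("yacht", 3), 10)]

def tiers : PySem.Dict Int Int := PySem.Dict.mk [(1, 585), (2, 1025), (3, 1000000)]

-- one iteration of A's per-room loop body; `getD _ 0` is exact under Pre_ (the keys are
-- present there; where they are not, the Python raises KeyError and Pre_ excludes the input)
def aRoom (room_type : String) (st : Int × Int × Int × PySem.Dict Int Int) :
    Int × Int × Int × PySem.Dict Int Int :=
  let total_rooms := st.2.1 + 1
  let current_tier := if total_rooms > tiers.getD st.2.2.1 0 then st.2.2.1 + 1 else st.2.2.1
  let commission := pricing_structure.getD (room_type, current_tier) 0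
  (st.1 + commission, total_rooms, current_tier, st.2.2.2.modify current_tier 0 (· + commission))

-- A's body for one room_type of the priority list
def aType (rd : PySem.Dict String Int) (st : Int × Int × Int × PySem.Dict Int Int)
    (room_type : String) : Int × Int × Int × PySem.Dict Int Int :=
  if rd.contains room_type then
    (PySem.List.pyRange 0 (rd.getD room_type 0) 1).foldl (fun st _ => aRoom room_type st) st
  else st

def calculate_commission (rooms_sold : List (String × Int)) : Int × (List (Int × Int)) :=
  let st := ["inside", "outside", "balcony", "suite", "yacht"].foldl
      (aType (PySem.Dict.mk rooms_sold))
      ((0 : Int), (0 : Int), (1 : Int), PySem.Dict.mk [((1 : Int), (0 : Int)), (2, 0), (3, 0)])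
  (st.1, st.2.2.2.items)

-- ===== PORT B =====
def bBoundaries : List Int := [585, 1025, 1000000]

def bPrices : PySem.Dict String (List Int) := PySem.Dict.mk
  [("inside", [2, 5, 7]), ("outside", [2, 5, 7]), ("balcony", [3, 6, 8]),
   ("suite", [4, 7, 9]), ("yacht", [5, 8, 10])]

-- B's inner loop body (list indices are always in range 0..2, so `pyGetD _ _ 0` is exact)
def bTier (pos c : Int) (pr : List Int) (st : Int × PySem.Dict Int Int) (i : Int) :
    Int × PySem.Dict Int Int :=
  let lo := if i = 0 then pos else max pos (PySem.List.pyGetD bBoundaries (i - 1) 0)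
  let take := min (pos + c) (PySem.List.pyGetD bBoundaries i 0) - lo
  if take > 0 then
    let amt := take * PySem.List.pyGetD pr i 0
    (st.1 + amt, st.2.modify (i + 1) 0 (· + amt))
  else st

-- B's body for one room type t of the priority list
def bType (rd : PySem.Dict String Int) (st : Int × Int × PySem.Dict Int Int) (t : String) :
    Int × Int × PySem.Dict Int Int :=
  if rd.contains t then
    let c := max (rd.getD t 0) 0
    let inner := (PySem.List.pyRange 0 3 1).foldl (bTier st.2.1 c (bPrices.getD t [])) (st.1, st.2.2)
    (inner.1, st.2.1 + c, inner.2)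
  else st

def calculate_commission_alt (rooms_sold : List (String × Int)) : Int × (List (Int × Int)) :=
  let st := ["inside", "outside", "balcony", "suite", "yacht"].foldl
      (bType (PySem.Dict.mk rooms_sold))
      ((0 : Int), (0 : Int), PySem.Dict.mk [((1 : Int), (0 : Int)), (2, 0), (3, 0)])
  (st.1, st.2.2.items)

-- ===== PRECONDITION & SPEC =====
-- Pre_ excludes exactly the inputs where the total number of rooms over the five priority
-- types exceeds 1,000,000: there A's current_tier reaches 4 and A raises KeyError.
def Pre_calculate_commission (rooms_sold : List (String × Int)) : Prop :=
  (["inside", "outside", "balcony", "suite", "yacht"].map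
     (fun t => max ((PySem.Dict.mk rooms_sold).getD t 0) 0)).sum ≤ 1000000
instance (rooms_sold : List (String × Int)) : Decidable (Pre_calculate_commission rooms_sold) := by
  unfold Pre_calculate_commission; infer_instance

def pvWitness_calculate_commission : (List (String × Int)) := [("inside", 3), ("yacht", 2)]

def Spec_calculate_commission (rooms_sold : List (String × Int)) (out : Int × (List (Int × Int))) : Prop := out = calculate_commission_alt rooms_sold
instance (rooms_sold : List (String × Int)) (out : Int × (List (Int × Int))) : Decidable (Spec_calculate_commission rooms_sold out) := by unfold Spec_calculate_commission; infer_instance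

-- ===== CLAIM (what is proved, stated in full; the proofs are below) =====
def Claim_equal_calculate_commission : Prop := ∀ (rooms_sold : List (String × Int)), Dom_calculate_commission rooms_sold → Pre_calculate_commission rooms_sold → Spec_calculate_commission rooms_sold (calculate_commission rooms_sold)

-- ===== LEMMAS AND PROOFS =====

-- the tier A's counter is in after r rooms (for r ≤ 1,000,000)
def pvTierOf (r : Int) : Int := if r ≤ 585 then 1 else if r ≤ 1025 then 2 else 3

-- number of the rooms r+1 … r+e that fall in the tier covering positions lo+1 … hi
def cnt (lo hi r e : Int) : Int := max 0 (min (r + e) hi - max r lo)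

def cm3 (a b c : Int) : PySem.Dict Int Int := PySem.Dict.mk [(1, a), (2, b), (3, c)]

-- the common closed form both per-type bodies compute (B's state shape)
def nxt (p1 p2 p3 r e T a b c : Int) : Int × Int × PySem.Dict Int Int :=
  (T + p1 * cnt 0 585 r e + p2 * cnt 585 1025 r e + p3 * cnt 1025 1000000 r e,
   r + e,
   cm3 (a + p1 * cnt 0 585 r e) (b + p2 * cnt 585 1025 r e) (c + p3 * cnt 1025 1000000 r e))

lemma foldl_const {α β : Type} (f : α → α) :
    ∀ (l : List β) (init : α), l.foldl (fun s _ => f s) init = f^[l.length] init := by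
  intro l
  induction l with
  | nil => intro init; rfl
  | cons x xs ih =>
      intro init
      simp [List.foldl_cons, ih, Function.iterate_succ_apply]

lemma tierOf_one {x : Int} (h : x ≤ 585) : pvTierOf x = 1 := by simp [pvTierOf, h]

lemma tierOf_two {x : Int} (h : 585 < x) (h' : x ≤ 1025) : pvTierOf x = 2 := by
  simp [pvTierOf]; omega

lemma tierOf_three {x : Int} (h : 1025 < x) : pvTierOf x = 3 := by simp [pvTierOf]; omega

lemma tier_step (r : Int) (h0 : 0 ≤ r) (h1 : r + 1 ≤ 1000000) :
    (if r + 1 > tiers.getD (pvTierOf r) 0 then pvTierOf r + 1 else pvTierOf r) = pvTierOf (r + 1) := by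
  by_cases c1 : r + 1 ≤ 585
  · rw [tierOf_one (show r ≤ 585 by omega), show tiers.getD 1 0 = 585 from rfl,
      if_neg (by omega), tierOf_one c1]
  · by_cases c3 : r ≤ 585
    · rw [tierOf_one c3, show tiers.getD 1 0 = 585 from rfl, if_pos (by omega),
        tierOf_two (by omega) (by omega)]
      norm_num
    · by_cases c2 : r + 1 ≤ 1025
      · rw [tierOf_two (by omega) (by omega), show tiers.getD 2 0 = 1025 from rfl,
          if_neg (by omega), tierOf_two (by omega) c2]
      · by_cases c4 : r ≤ 1025
        · rw [tierOf_two (by omega) c4, show tiers.getD 2 0 = 1025 from rfl,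
            if_pos (by omega), tierOf_three (by omega)]
          norm_num
        · rw [tierOf_three (by omega), show tiers.getD 3 0 = 1000000 from rfl,
            if_neg (by omega), tierOf_three (by omega)]

lemma cm3_modify_one (a b c x : Int) : (cm3 a b c).modify 1 0 (· + x) = cm3 (a + x) b c := by
  simp [cm3, PySem.Dict.modify, PySem.Dict.getD, PySem.Dict.get?, PySem.Dict.insert,
    PySem.Dict.contains]

lemma cm3_modify_two (a b c x : Int) : (cm3 a b c).modify 2 0 (· + x) = cm3 a (b + x) c := by
  simp [cm3, PySem.Dict.modify, PySem.Dict.getD, PySem.Dict.get?, PySem.Dict.insert,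
    PySem.Dict.contains]

lemma cm3_modify_three (a b c x : Int) : (cm3 a b c).modify 3 0 (· + x) = cm3 a b (c + x) := by
  simp [cm3, PySem.Dict.modify, PySem.Dict.getD, PySem.Dict.get?, PySem.Dict.insert,
    PySem.Dict.contains]

lemma cnt_zero (r : Int) : ∀ lo hi : Int, cnt lo hi r 0 = 0 := by
  intro lo hi; unfold cnt; omega

lemma aLoop (t : String) (p1 p2 p3 : Int)
    (hp1 : pricing_structure.getD (t, 1) 0 = p1)
    (hp2 : pricing_structure.getD (t, 2) 0 = p2)
    (hp3 : pricing_structure.getD (t, 3) 0 = p3) :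
    ∀ (n : Nat) (T r a b c : Int), 0 ≤ r → r + n ≤ 1000000 →
      (aRoom t)^[n] (T, r, pvTierOf r, cm3 a b c) =
      (T + p1 * cnt 0 585 r n + p2 * cnt 585 1025 r n + p3 * cnt 1025 1000000 r n,
       r + n, pvTierOf (r + n),
       cm3 (a + p1 * cnt 0 585 r n) (b + p2 * cnt 585 1025 r n) (c + p3 * cnt 1025 1000000 r n)) := by
  intro n
  induction n with
  | zero =>
      intro T r a b c h0 hN
      simp [cnt_zero]
  | succ n ih =>
      intro T r a b c h0 hN
      have h1 : r + 1 ≤ 1000000 := by push_cast at hN; omega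
      rw [Function.iterate_succ_apply]
      simp only [aRoom]
      rw [tier_step r h0 h1]
      by_cases c1 : r + 1 ≤ 585
      · have ih' := ih (T + p1) (r + 1) (a + p1) b c (by omega) (by push_cast at hN ⊢; omega)
        rw [tierOf_one c1] at ih'
        rw [tierOf_one c1, hp1, cm3_modify_one, ih']
        have e1 : cnt 0 585 r ((n + 1 : Nat) : Int) = cnt 0 585 (r + 1) (n : Int) + 1 := by
          unfold cnt; push_cast; omega
        have e2 : cnt 585 1025 r ((n + 1 : Nat) : Int) = cnt 585 1025 (r + 1) (n : Int) := by
          unfold cnt; push_cast; omega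
        have e3 : cnt 1025 1000000 r ((n + 1 : Nat) : Int) = cnt 1025 1000000 (r + 1) (n : Int) := by
          unfold cnt; push_cast at hN ⊢; omega
        rw [e1, e2, e3]
        refine Prod.ext (by ring) (Prod.ext (by push_cast; ring) (Prod.ext ?_ ?_))
        · show pvTierOf (r + 1 + (n : Int)) = pvTierOf (r + ((n + 1 : Nat) : Int))
          congr 1; push_cast; ring
        · show cm3 _ _ _ = cm3 _ _ _
          unfold cm3
          refine congrArg PySem.Dict.mk ?_
          simp only [List.cons.injEq, Prod.mk.injEq, and_true, true_and]
          ring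
      · by_cases c2 : r + 1 ≤ 1025
        · have ih' := ih (T + p2) (r + 1) a (b + p2) c (by omega) (by push_cast at hN ⊢; omega)
          rw [tierOf_two (by omega) c2] at ih'
          rw [tierOf_two (by omega) c2, hp2, cm3_modify_two, ih']
          have e1 : cnt 0 585 r ((n + 1 : Nat) : Int) = cnt 0 585 (r + 1) (n : Int) := by
            unfold cnt; push_cast; omega
          have e2 : cnt 585 1025 r ((n + 1 : Nat) : Int) = cnt 585 1025 (r + 1) (n : Int) + 1 := by
            unfold cnt; push_cast; omega
          have e3 : cnt 1025 1000000 r ((n + 1 : Nat) : Int) = cnt 1025 1000000 (r + 1) (n : Int) := by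
            unfold cnt; push_cast at hN ⊢; omega
          rw [e1, e2, e3]
          refine Prod.ext (by ring) (Prod.ext (by push_cast; ring) (Prod.ext ?_ ?_))
          · show pvTierOf (r + 1 + (n : Int)) = pvTierOf (r + ((n + 1 : Nat) : Int))
            congr 1; push_cast; ring
          · show cm3 _ _ _ = cm3 _ _ _
            unfold cm3
            refine congrArg PySem.Dict.mk ?_
            simp only [List.cons.injEq, Prod.mk.injEq, and_true, true_and]
            ring
        · have ih' := ih (T + p3) (r + 1) a b (c + p3) (by omega) (by push_cast at hN ⊢; omega)
          rw [tierOf_three (by omega)] at ih'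
          rw [tierOf_three (by omega), hp3, cm3_modify_three, ih']
          have e1 : cnt 0 585 r ((n + 1 : Nat) : Int) = cnt 0 585 (r + 1) (n : Int) := by
            unfold cnt; push_cast; omega
          have e2 : cnt 585 1025 r ((n + 1 : Nat) : Int) = cnt 585 1025 (r + 1) (n : Int) := by
            unfold cnt; push_cast; omega
          have e3 : cnt 1025 1000000 r ((n + 1 : Nat) : Int) = cnt 1025 1000000 (r + 1) (n : Int) + 1 := by
            unfold cnt; push_cast at hN ⊢; omega
          rw [e1, e2, e3]
          refine Prod.ext (by ring) (Prod.ext (by push_cast; ring) (Prod.ext ?_ ?_))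
          · show pvTierOf (r + 1 + (n : Int)) = pvTierOf (r + ((n + 1 : Nat) : Int))
            congr 1; push_cast; ring
          · show cm3 _ _ _ = cm3 _ _ _
            unfold cm3
            refine congrArg PySem.Dict.mk ?_
            simp only [List.cons.injEq, Prod.mk.injEq, and_true, true_and]
            ring

lemma aType_closed (rd : PySem.Dict String Int) (t : String) (p1 p2 p3 : Int)
    (hp1 : pricing_structure.getD (t, 1) 0 = p1)
    (hp2 : pricing_structure.getD (t, 2) 0 = p2)
    (hp3 : pricing_structure.getD (t, 3) 0 = p3)
    (T r a b c e : Int) (he : e = max (rd.getD t 0) 0)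
    (h0 : 0 ≤ r) (hN : r + e ≤ 1000000) :
    aType rd (T, r, pvTierOf r, cm3 a b c) t =
      ((nxt p1 p2 p3 r e T a b c).1, (nxt p1 p2 p3 r e T a b c).2.1,
       pvTierOf (nxt p1 p2 p3 r e T a b c).2.1, (nxt p1 p2 p3 r e T a b c).2.2) := by
  unfold aType
  by_cases hc : rd.contains t
  · rw [if_pos hc, foldl_const, PySem.List.length_pyRange_one]
    have hcast : (((rd.getD t 0 - 0).toNat : Nat) : Int) = e := by omega
    rw [aLoop t p1 p2 p3 hp1 hp2 hp3 _ T r a b c h0 (by rw [hcast]; exact hN), hcast]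
    rfl
  · rw [if_neg hc]
    have he0 : e = 0 := by
      rw [he, PySem.Dict.getD_of_not_contains rd 0 (by simpa using hc)]; norm_num
    simp [nxt, he0, cnt_zero]

lemma bTier_at_zero (pos c p1 p2 p3 : Int) (st : Int × PySem.Dict Int Int) :
    bTier pos c [p1, p2, p3] st 0 =
      if 0 < min (pos + c) 585 - pos then
        (st.1 + (min (pos + c) 585 - pos) * p1,
         st.2.modify 1 0 (· + (min (pos + c) 585 - pos) * p1))
      else st := rfl

lemma bTier_at_one (pos c p1 p2 p3 : Int) (st : Int × PySem.Dict Int Int) :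
    bTier pos c [p1, p2, p3] st 1 =
      if 0 < min (pos + c) 1025 - max pos 585 then
        (st.1 + (min (pos + c) 1025 - max pos 585) * p2,
         st.2.modify 2 0 (· + (min (pos + c) 1025 - max pos 585) * p2))
      else st := rfl

lemma bTier_at_two (pos c p1 p2 p3 : Int) (st : Int × PySem.Dict Int Int) :
    bTier pos c [p1, p2, p3] st 2 =
      if 0 < min (pos + c) 1000000 - max pos 1025 then
        (st.1 + (min (pos + c) 1000000 - max pos 1025) * p3,
         st.2.modify 3 0 (· + (min (pos + c) 1000000 - max pos 1025) * p3))
      else st := rfl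

lemma bLoop (pr : List Int) (p1 p2 p3 : Int) (hp : pr = [p1, p2, p3])
    (T r a b c e : Int) (h0 : 0 ≤ r) :
    (PySem.List.pyRange 0 3 1).foldl (bTier r e pr) (T, cm3 a b c) =
      ((nxt p1 p2 p3 r e T a b c).1, (nxt p1 p2 p3 r e T a b c).2.2) := by
  subst hp
  rw [show PySem.List.pyRange 0 3 1 = [0, 1, 2] from rfl]
  simp only [List.foldl_cons, List.foldl_nil]
  rw [bTier_at_zero, bTier_at_one, bTier_at_two]
  by_cases h1 : 0 < min (r + e) 585 - r
  · by_cases h2 : 0 < min (r + e) 1025 - max r 585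
    · by_cases h3 : 0 < min (r + e) 1000000 - max r 1025
      · simp only [h1, h2, h3, ite_true, ite_false, cm3_modify_one, cm3_modify_two,
        cm3_modify_three]
        unfold nxt
        have q1 : cnt 0 585 r e = min (r + e) 585 - r := by unfold cnt; omega
        have q2 : cnt 585 1025 r e = min (r + e) 1025 - max r 585 := by unfold cnt; omega
        have q3 : cnt 1025 1000000 r e = min (r + e) 1000000 - max r 1025 := by unfold cnt; omega
        rw [q1, q2, q3]
        refine Prod.ext (by ring) ?_
        unfold cm3
        refine congrArg PySem.Dict.mk ?_
        simp only [List.cons.injEq, Prod.mk.injEq]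
        and_intros <;> first | rfl | trivial | ring
      · simp only [h1, h2, h3, ite_true, ite_false, cm3_modify_one, cm3_modify_two,
        cm3_modify_three]
        unfold nxt
        have q1 : cnt 0 585 r e = min (r + e) 585 - r := by unfold cnt; omega
        have q2 : cnt 585 1025 r e = min (r + e) 1025 - max r 585 := by unfold cnt; omega
        have q3 : cnt 1025 1000000 r e = 0 := by unfold cnt; omega
        rw [q1, q2, q3]
        refine Prod.ext (by ring) ?_
        unfold cm3
        refine congrArg PySem.Dict.mk ?_
        simp only [List.cons.injEq, Prod.mk.injEq]
        and_intros <;> first | rfl | trivial | ring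
    · by_cases h3 : 0 < min (r + e) 1000000 - max r 1025
      · simp only [h1, h2, h3, ite_true, ite_false, cm3_modify_one, cm3_modify_two,
        cm3_modify_three]
        unfold nxt
        have q1 : cnt 0 585 r e = min (r + e) 585 - r := by unfold cnt; omega
        have q2 : cnt 585 1025 r e = 0 := by unfold cnt; omega
        have q3 : cnt 1025 1000000 r e = min (r + e) 1000000 - max r 1025 := by unfold cnt; omega
        rw [q1, q2, q3]
        refine Prod.ext (by ring) ?_
        unfold cm3
        refine congrArg PySem.Dict.mk ?_
        simp only [List.cons.injEq, Prod.mk.injEq]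
        and_intros <;> first | rfl | trivial | ring
      · simp only [h1, h2, h3, ite_true, ite_false, cm3_modify_one, cm3_modify_two,
        cm3_modify_three]
        unfold nxt
        have q1 : cnt 0 585 r e = min (r + e) 585 - r := by unfold cnt; omega
        have q2 : cnt 585 1025 r e = 0 := by unfold cnt; omega
        have q3 : cnt 1025 1000000 r e = 0 := by unfold cnt; omega
        rw [q1, q2, q3]
        refine Prod.ext (by ring) ?_
        unfold cm3
        refine congrArg PySem.Dict.mk ?_
        simp only [List.cons.injEq, Prod.mk.injEq]
        and_intros <;> first | rfl | trivial | ring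
  · by_cases h2 : 0 < min (r + e) 1025 - max r 585
    · by_cases h3 : 0 < min (r + e) 1000000 - max r 1025
      · simp only [h1, h2, h3, ite_true, ite_false, cm3_modify_one, cm3_modify_two,
        cm3_modify_three]
        unfold nxt
        have q1 : cnt 0 585 r e = 0 := by unfold cnt; omega
        have q2 : cnt 585 1025 r e = min (r + e) 1025 - max r 585 := by unfold cnt; omega
        have q3 : cnt 1025 1000000 r e = min (r + e) 1000000 - max r 1025 := by unfold cnt; omega
        rw [q1, q2, q3]
        refine Prod.ext (by ring) ?_
        unfold cm3
        refine congrArg PySem.Dict.mk ?_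
        simp only [List.cons.injEq, Prod.mk.injEq]
        and_intros <;> first | rfl | trivial | ring
      · simp only [h1, h2, h3, ite_true, ite_false, cm3_modify_one, cm3_modify_two,
        cm3_modify_three]
        unfold nxt
        have q1 : cnt 0 585 r e = 0 := by unfold cnt; omega
        have q2 : cnt 585 1025 r e = min (r + e) 1025 - max r 585 := by unfold cnt; omega
        have q3 : cnt 1025 1000000 r e = 0 := by unfold cnt; omega
        rw [q1, q2, q3]
        refine Prod.ext (by ring) ?_
        unfold cm3
        refine congrArg PySem.Dict.mk ?_
        simp only [List.cons.injEq, Prod.mk.injEq]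
        and_intros <;> first | rfl | trivial | ring
    · by_cases h3 : 0 < min (r + e) 1000000 - max r 1025
      · simp only [h1, h2, h3, ite_true, ite_false, cm3_modify_one, cm3_modify_two,
        cm3_modify_three]
        unfold nxt
        have q1 : cnt 0 585 r e = 0 := by unfold cnt; omega
        have q2 : cnt 585 1025 r e = 0 := by unfold cnt; omega
        have q3 : cnt 1025 1000000 r e = min (r + e) 1000000 - max r 1025 := by unfold cnt; omega
        rw [q1, q2, q3]
        refine Prod.ext (by ring) ?_
        unfold cm3
        refine congrArg PySem.Dict.mk ?_
        simp only [List.cons.injEq, Prod.mk.injEq]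
        and_intros <;> first | rfl | trivial | ring
      · simp only [h1, h2, h3, ite_true, ite_false, cm3_modify_one, cm3_modify_two,
        cm3_modify_three]
        unfold nxt
        have q1 : cnt 0 585 r e = 0 := by unfold cnt; omega
        have q2 : cnt 585 1025 r e = 0 := by unfold cnt; omega
        have q3 : cnt 1025 1000000 r e = 0 := by unfold cnt; omega
        rw [q1, q2, q3]
        refine Prod.ext (by ring) ?_
        unfold cm3
        refine congrArg PySem.Dict.mk ?_
        simp only [List.cons.injEq, Prod.mk.injEq]
        and_intros <;> first | rfl | trivial | ring

lemma bType_closed (rd : PySem.Dict String Int) (t : String) (p1 p2 p3 : Int)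
    (hb : bPrices.getD t [] = [p1, p2, p3])
    (T r a b c e : Int) (he : e = max (rd.getD t 0) 0) (h0 : 0 ≤ r) :
    bType rd (T, r, cm3 a b c) t = nxt p1 p2 p3 r e T a b c := by
  subst he
  unfold bType
  by_cases hc : rd.contains t
  · simp only [hc, if_true]
    rw [bLoop _ p1 p2 p3 hb T r a b c _ h0]
    rfl
  · simp only [hc, if_false]
    have he0 : max (rd.getD t 0) 0 = 0 := by
      rw [PySem.Dict.getD_of_not_contains rd 0 (by simpa using hc)]; norm_num
    rw [he0]
    simp [nxt, cnt_zero]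

lemma step_pair (rd : PySem.Dict String Int) (t : String) (p1 p2 p3 : Int)
    (hp1 : pricing_structure.getD (t, 1) 0 = p1)
    (hp2 : pricing_structure.getD (t, 2) 0 = p2)
    (hp3 : pricing_structure.getD (t, 3) 0 = p3)
    (hb : bPrices.getD t [] = [p1, p2, p3])
    (T r a b c : Int) (h0 : 0 ≤ r) (hN : r + max (rd.getD t 0) 0 ≤ 1000000) :
    ∃ T' r' a' b' c',
      aType rd (T, r, pvTierOf r, cm3 a b c) t = (T', r', pvTierOf r', cm3 a' b' c') ∧
      bType rd (T, r, cm3 a b c) t = (T', r', cm3 a' b' c') ∧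
      r' = r + max (rd.getD t 0) 0 ∧ 0 ≤ r' := by
  exact ⟨_, _, _, _, _,
    aType_closed rd t p1 p2 p3 hp1 hp2 hp3 T r a b c _ rfl h0 hN,
    bType_closed rd t p1 p2 p3 hb T r a b c _ rfl h0,
    rfl, by simp only [nxt]; omega⟩

-- ===== VERDICT (by name: the statement is the Claim_ definition above) =====
theorem calculate_commission_spec : Claim_equal_calculate_commission := by
  intro rooms_sold hdom hpre
  unfold Spec_calculate_commission calculate_commission calculate_commission_alt
  set rd := PySem.Dict.mk rooms_sold with hrd
  have hpre' : max (rd.getD "inside" 0) 0 + max (rd.getD "outside" 0) 0 +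
      max (rd.getD "balcony" 0) 0 + max (rd.getD "suite" 0) 0 +
      max (rd.getD "yacht" 0) 0 ≤ 1000000 := by
    unfold Pre_calculate_commission at hpre
    simp only [List.map, List.sum_cons, List.sum_nil, add_zero, ← hrd] at hpre
    omega
  simp only [List.foldl_cons, List.foldl_nil]
  rw [show (((0 : Int), (0 : Int), (1 : Int), PySem.Dict.mk [((1 : Int), (0 : Int)), (2, 0), (3, 0)]) :
        Int × Int × Int × PySem.Dict Int Int) = (0, 0, pvTierOf 0, cm3 0 0 0) from rfl,
      show ((0 : Int), (0 : Int), PySem.Dict.mk [((1 : Int), (0 : Int)), (2, 0), (3, 0)]) =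
        ((0 : Int), (0 : Int), cm3 0 0 0) from rfl]
  obtain ⟨T1, r1, a1, b1, c1, hA1, hB1, hr1, hg1⟩ :=
    step_pair rd "inside" 2 5 7 rfl rfl rfl rfl 0 0 0 0 0 le_rfl (by omega)
  rw [hA1, hB1]
  obtain ⟨T2, r2, a2, b2, c2, hA2, hB2, hr2, hg2⟩ :=
    step_pair rd "outside" 2 5 7 rfl rfl rfl rfl T1 r1 a1 b1 c1 hg1 (by omega)
  rw [hA2, hB2]
  obtain ⟨T3, r3, a3, b3, c3, hA3, hB3, hr3, hg3⟩ :=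
    step_pair rd "balcony" 3 6 8 rfl rfl rfl rfl T2 r2 a2 b2 c2 hg2 (by omega)
  rw [hA3, hB3]
  obtain ⟨T4, r4, a4, b4, c4, hA4, hB4, hr4, hg4⟩ :=
    step_pair rd "suite" 4 7 9 rfl rfl rfl rfl T3 r3 a3 b3 c3 hg3 (by omega)
  rw [hA4, hB4]
  obtain ⟨T5, r5, a5, b5, c5, hA5, hB5, hr5, hg5⟩ :=
    step_pair rd "yacht" 5 8 10 rfl rfl rfl rfl T4 r4 a4 b4 c4 hg4 (by omega)
  rw [hA5, hB5]
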